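-- pv_equiv track=rewrite | github.com/chris00234/leet | Find_Three_Consecutive_Integers_That_Sum_to_a_Given_Number/main.py | sumOfThree
-- ===== SOURCE A (Python) =====
-- from typing import List
--
-- def sumOfThree(num: int) -> List[int]:
--     l = num // 3 - 1
--     r = l + 2
--     sm = l + l + 1 + r
--
--     while sm <= num:
--         if sm == num:
--             return [l, l + 1, r]
--         sm -= l
--         l += 1
--         r += 1
--         sm += r
--     return []
-- ===== SOURCE B (Python) =====
-- def sumOfThree(num: int) -> list:
--     if num % 3 == 0:
--         q = num // 3
--         return [q - 1, q, q + 1]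
--     return []
-- ===== Notes on version B (the rewrite author's own statement) =====
-- stated objective: simpler
-- what changed: Replaced the sliding-window while loop by a closed form: a sum of three consecutive integers is three times the middle one, so B does a single divisibility test and builds the triple around the floor quotient.
import Mathlib
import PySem

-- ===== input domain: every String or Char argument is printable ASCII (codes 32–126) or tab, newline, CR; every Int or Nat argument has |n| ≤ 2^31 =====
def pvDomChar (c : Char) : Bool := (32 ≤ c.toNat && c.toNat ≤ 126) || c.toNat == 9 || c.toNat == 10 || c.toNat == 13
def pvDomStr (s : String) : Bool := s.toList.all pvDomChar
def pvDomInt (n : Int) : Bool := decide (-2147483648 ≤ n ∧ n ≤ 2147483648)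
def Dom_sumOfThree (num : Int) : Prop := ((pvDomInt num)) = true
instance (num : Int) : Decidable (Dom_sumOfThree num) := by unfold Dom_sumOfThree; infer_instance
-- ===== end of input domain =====

-- B replaces A's sliding-window while loop by the closed form: the sum of three
-- consecutive integers is three times the middle one, so it is a single divisibility test (objective: simpler).

-- ===== PORT A =====
-- A's while loop, step for step; the fuel is only a totality guard (the loop body
-- raises sm by 3 each step, so it exits within 2 iterations; fuel 2 is never exhausted).
def sumOfThreeLoop (num : Int) : Nat → Int → Int → Int → List Int
  | 0, _, _, _ => []
  | n + 1, l, r, sm =>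
    if sm ≤ num then
      if sm = num then [l, l + 1, r]
      else
        -- sm -= l; l += 1; r += 1; sm += r  (with the updated r)
        sumOfThreeLoop num n (l + 1) (r + 1) (sm - l + (r + 1))
    else []

def sumOfThree (num : Int) : List Int :=
  let l := PySem.Int.floordiv num 3 - 1
  let r := l + 2
  let sm := l + l + 1 + r
  sumOfThreeLoop num 2 l r sm

-- ===== PORT B =====
def sumOfThree_alt (num : Int) : List Int :=
  if PySem.Int.mod num 3 = 0 then
    let q := PySem.Int.floordiv num 3
    [q - 1, q, q + 1]
  else []

-- ===== PRECONDITION & SPEC =====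
def Spec_sumOfThree (num : Int) (out : List Int) : Prop := out = sumOfThree_alt num
instance (num : Int) (out : List Int) : Decidable (Spec_sumOfThree num out) := by unfold Spec_sumOfThree; infer_instance

-- ===== CLAIM (what is proved, stated in full; the proofs are below) =====
def Claim_equal_sumOfThree : Prop := ∀ (num : Int), Dom_sumOfThree num → Spec_sumOfThree num (sumOfThree num)

-- ===== LEMMAS AND PROOFS =====

-- ===== VERDICT (by name: the statement is the Claim_ definition above) =====
theorem sumOfThree_spec : Claim_equal_sumOfThree := by
  intro num _
  unfold Spec_sumOfThree sumOfThree sumOfThree_alt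
  rw [PySem.Int.floordiv_eq_ediv_of_pos (by omega), PySem.Int.mod_eq_emod_of_pos (by omega)]
  simp only [sumOfThreeLoop]
  split_ifs <;> first | rfl | omega | (rw [show num / 3 - 1 + 1 = num / 3 from by omega, show num / 3 - 1 + 2 = num / 3 + 1 from by omega])
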